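-- pv_equiv track=rewrite | github.com/adityakumar1990/iNueron | misleanous.py | power_of_any_num
-- ===== SOURCE A (Python) =====
-- def power_of_any_num(input_num):
--     power_digit=[]
--     for i in range(2,input_num):
--         n=1
--
--         while True:
--             if input_num== i **n :
--                 power_digit.append(i)
--                 break
--             elif input_num < i **n :
--                 break
--             else:
--                 n=n+1
--     return power_digit
-- ===== SOURCE B (Python) =====
-- def power_of_any_num(input_num):
--     # Search only bases up to sqrt(input_num); test each base by repeatedly
--     # dividing input_num down by it (exact integer division) instead of
--     # multiplying powers up.
--     result = []
--     i = 2
--     while i * i <= input_num: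
--         m = input_num
--         while m % i == 0:
--             m //= i
--         if m == 1:
--             result.append(i)
--         i += 1
--     return result
-- ===== Notes on version B (the rewrite author's own statement) =====
-- stated objective: faster
-- what changed: B searches only bases i with i*i <= input_num instead of all i < input_num, and decides whether input_num is a power of i by repeatedly dividing input_num down by i exactly, instead of A's inner loop that multiplies powers i**n upward and compares; the result list is built already in ascending order.
import Mathlib
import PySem

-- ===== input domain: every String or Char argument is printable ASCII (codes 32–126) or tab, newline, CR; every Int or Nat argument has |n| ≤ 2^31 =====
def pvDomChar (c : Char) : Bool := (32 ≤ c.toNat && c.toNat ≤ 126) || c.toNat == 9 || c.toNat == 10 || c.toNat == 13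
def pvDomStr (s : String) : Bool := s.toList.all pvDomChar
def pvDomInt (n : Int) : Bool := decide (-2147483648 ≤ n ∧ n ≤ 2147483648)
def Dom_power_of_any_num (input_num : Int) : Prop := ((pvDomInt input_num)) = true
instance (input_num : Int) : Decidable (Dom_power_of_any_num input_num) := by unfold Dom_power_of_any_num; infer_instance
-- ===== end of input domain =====

-- B changes the search: bases only up to sqrt(input_num), tested by exact repeated division
-- instead of A's upward power comparison (measured faster).

-- ===== PORT A =====
-- A's inner 'while True' loop: n=1; if input_num == i**n: found; elif input_num < i**n: not
-- found; else n += 1.  The 'h : 2 ≤ i' guard only makes the recursion total: A calls it with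
-- i ∈ range(2, input_num) so i ≥ 2 always, and the 'false' fallback branch is unreachable.
def powChaseA (input_num i : Int) (n : Nat) : Bool :=
  if input_num = i ^ n then true
  else if input_num < i ^ n then false
  else if h : 2 ≤ i then powChaseA input_num i (n + 1) else false
termination_by (input_num - i ^ n).toNat
decreasing_by
  have h1 : (1 : Int) ≤ i ^ n := one_le_pow₀ (by omega)
  have h2 : i ^ n + i ^ n ≤ i ^ (n + 1) := by
    have := pow_succ i n
    nlinarith
  omega

def power_of_any_num (input_num : Int) : List Int :=
  (PySem.List.pyRange 2 input_num 1).foldl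
    (fun power_digit i => if powChaseA input_num i 1 then power_digit ++ [i] else power_digit) []

-- ===== PORT B =====
-- B's inner loop: m = input_num; while m % i == 0: m //= i; then test m == 1.
-- The 'h : …' guard only makes the recursion total: B calls it with i ≥ 2 and m ≥ 4.
def divDownB (m i : Int) : Bool :=
  if PySem.Int.mod m i = 0 then
    (if h : 2 ≤ i ∧ 1 ≤ m then divDownB (PySem.Int.floordiv m i) i else false)
  else m = 1
termination_by m.toNat
decreasing_by
  obtain ⟨hi, hm⟩ := h
  have hfd : PySem.Int.floordiv m i = m / i := PySem.Int.floordiv_eq_ediv_of_pos (by omega)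
  have hkey := Int.mul_ediv_add_emod m i
  have hnn := Int.emod_nonneg m (by omega : i ≠ 0)
  have hq : 0 ≤ m / i := Int.ediv_nonneg (by omega) (by omega)
  have hlt : m / i < m := by nlinarith
  omega

-- B's outer 'while i * i <= input_num' loop; the '2 ≤ i' conjunct only makes the recursion
-- total (B starts at i = 2 and increments, so it always holds on B's own calls).
def scanB (input_num i : Int) : List Int :=
  if h : 2 ≤ i ∧ i * i ≤ input_num then
    (if divDownB input_num i then [i] else []) ++ scanB input_num (i + 1)
  else []
termination_by (input_num - i).toNat
decreasing_by
  obtain ⟨hi, hsq⟩ := h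
  have : i + 2 ≤ i * i := by nlinarith
  omega

def power_of_any_num_alt (input_num : Int) : List Int := scanB input_num 2

-- ===== PRECONDITION & SPEC =====
def Spec_power_of_any_num (input_num : Int) (out : List Int) : Prop := out = power_of_any_num_alt input_num
instance (input_num : Int) (out : List Int) : Decidable (Spec_power_of_any_num input_num out) := by unfold Spec_power_of_any_num; infer_instance

-- ===== CLAIM (what is proved, stated in full; the proofs are below) =====
def Claim_equal_power_of_any_num : Prop := ∀ (input_num : Int), Dom_power_of_any_num input_num → Spec_power_of_any_num input_num (power_of_any_num input_num)

-- ===== LEMMAS AND PROOFS =====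

-- monotone powers for a base ≥ 2
theorem pv_pow_le_pow {i : Int} (hi : 2 ≤ i) {n m : Nat} (h : n ≤ m) : i ^ n ≤ i ^ m :=
  pow_le_pow_right₀ (by omega) h

-- A's inner loop at state n finds a power iff some exponent ≥ n works
theorem powChaseA_iff (input_num i : Int) (hi : 2 ≤ i) (n : Nat) :
    powChaseA input_num i n = true ↔ ∃ m : Nat, n ≤ m ∧ i ^ m = input_num := by
  fun_induction powChaseA input_num i n with
  | case1 n heq =>
      exact iff_of_true rfl ⟨n, le_refl n, heq.symm⟩
  | case2 n hne hlt =>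
      refine iff_of_false (by simp) ?_
      rintro ⟨m, hm, hpow⟩
      have := pv_pow_le_pow hi hm
      omega
  | case3 n hne hlt h ih =>
      rw [ih]
      constructor
      · rintro ⟨m, hm, hpow⟩; exact ⟨m, by omega, hpow⟩
      · rintro ⟨m, hm, hpow⟩
        refine ⟨m, ?_, hpow⟩
        rcases Nat.lt_or_ge n m with h' | h'
        · omega
        · have : m = n := by omega
          subst this; omega
  | case4 n hne hlt h => exact absurd hi h

-- B's inner division loop: m collapses to 1 iff m is a power of i
theorem divDownB_iff (m i : Int) (hi : 2 ≤ i) (hm : 1 ≤ m) :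
    divDownB m i = true ↔ ∃ k : Nat, i ^ k = m := by
  fun_induction divDownB m i with
  | case1 m hmod h ih =>
      obtain ⟨hi', hm'⟩ := h
      have hfd : PySem.Int.floordiv m i = m / i := PySem.Int.floordiv_eq_ediv_of_pos (by omega)
      have hdvd : i ∣ m := by
        have : PySem.Int.mod m i = m % i := PySem.Int.mod_eq_emod_of_pos (by omega)
        exact Int.dvd_of_emod_eq_zero (by omega)
      have hge : i ≤ m := Int.le_of_dvd (by omega) hdvd
      have hq1 : 1 ≤ m / i := by
        rw [Int.le_ediv_iff_mul_le (by omega)]; omega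
      rw [hfd] at ih ⊢
      rw [ih hq1]
      constructor
      · rintro ⟨k, hk⟩
        refine ⟨k + 1, ?_⟩
        rw [pow_succ, hk, Int.ediv_mul_cancel hdvd]
      · rintro ⟨k, hk⟩
        cases k with
        | zero =>
          simp at hk
          omega
        | succ k =>
          refine ⟨k, ?_⟩
          rw [pow_succ] at hk
          have : m / i = i ^ k := by
            rw [← hk, Int.mul_ediv_cancel _ (by omega)]
          omega
  | case2 m hmod h => exact absurd ⟨by omega, by omega⟩ h
  | case3 m hmod =>
      simp only [decide_eq_true_eq]
      constructor
      · rintro rfl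
        exact ⟨0, by simp⟩
      · rintro ⟨k, hk⟩
        cases k with
        | zero => simp at hk; omega
        | succ k =>
          exfalso
          have hdvd : i ∣ m := ⟨i ^ k, by rw [← hk, pow_succ]; ring⟩
          have : PySem.Int.mod m i = m % i := PySem.Int.mod_eq_emod_of_pos (by omega)
          have := Int.emod_eq_zero_of_dvd hdvd
          omega

-- no base i with i^2 > input_num and i < input_num can be a power base
theorem no_power_of_big (input_num i : Int) (hi : 2 ≤ i) (hlt : i < input_num)
    (hsq : input_num < i * i) : ¬ ∃ m : Nat, 1 ≤ m ∧ i ^ m = input_num := by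
  rintro ⟨m, hm, hpow⟩
  cases m with
  | zero => omega
  | succ m =>
    cases m with
    | zero => simp at hpow; omega
    | succ m =>
      have h2 : i ^ 2 ≤ i ^ (m + 1 + 1) := pv_pow_le_pow hi (by omega)
      have : i ^ 2 = i * i := sq i
      omega

-- the central bridge: A's filtered range from i equals B's scan from i
theorem filter_eq_scanB (input_num i : Int) (hi : 2 ≤ i) :
    (PySem.List.pyRange i input_num 1).filter (fun j => powChaseA input_num j 1)
      = scanB input_num i := by
  fun_induction scanB input_num i with
  | case1 i h ih =>
      obtain ⟨hi', hsq⟩ := h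
      have hlt : i < input_num := by nlinarith
      rw [PySem.List.pyRange_one_cons hlt, List.filter_cons, ih (by omega)]
      have hiff : powChaseA input_num i 1 = divDownB input_num i := by
        rw [Bool.eq_iff_iff, powChaseA_iff input_num i hi' 1,
            divDownB_iff input_num i hi' (by omega)]
        constructor
        · rintro ⟨m, _, hm⟩; exact ⟨m, hm⟩
        · rintro ⟨k, hk⟩
          refine ⟨k, ?_, hk⟩
          cases k with
          | zero => simp at hk; omega
          | succ k => omega
      rw [hiff]
      cases hdd : divDownB input_num i <;> simp
  | case2 i h =>
      rcases Nat.lt_or_ge 0 ((input_num - i).toNat) with hne | hle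
      · -- i < input_num but i*i > input_num: every j in the range fails the test
        rw [List.filter_eq_nil_iff]
        intro j hj
        rw [PySem.List.mem_pyRange_one] at hj
        have hj2 : 2 ≤ j := by omega
        have hsq : input_num < j * j := by nlinarith [Int.not_le.mp (fun hc => h ⟨hi, hc⟩), hj.1]
        rw [Bool.not_eq_true, Bool.eq_false_iff]
        intro hc
        exact no_power_of_big input_num j hj2 hj.2 hsq
          ((powChaseA_iff input_num j hj2 1).mp hc)
      · rw [PySem.List.pyRange_one_eq_nil (by omega)]
        rfl

-- ===== VERDICT (by name: the statement is the Claim_ definition above) =====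
theorem power_of_any_num_spec : Claim_equal_power_of_any_num := by
  intro input_num _
  unfold Spec_power_of_any_num power_of_any_num power_of_any_num_alt
  rw [PySem.List.foldl_append_if_eq_filter, List.nil_append]
  exact filter_eq_scanB input_num 2 (by omega)
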